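-- pv_equiv track=rewrite | github.com/sahilahuja14/live | Riskpredictionmodel/scoring/utils.py | _base_feature_name
-- ===== SOURCE A (Python) =====
-- def _base_feature_name(transformed_name: str, raw_features: list[str]) -> str:
--     cleaned = transformed_name
--     if "__" in cleaned:
--         cleaned = cleaned.split("__", 1)[1]
--
--     for raw in sorted(raw_features, key=len, reverse=True):
--         if cleaned == raw or cleaned.startswith(f"{raw}_"):
--             return raw
--     return cleaned
-- ===== SOURCE B (Python) =====
-- def _base_feature_name(transformed_name: str, raw_features: list[str]) -> str:
--     cleaned = transformed_name.split("__", 1)[1] if "__" in transformed_name else transformed_name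
--     raw_set = set(raw_features)
--     candidates = [cleaned] + [cleaned[:i] for i in reversed(range(len(cleaned))) if cleaned[i] == "_"]
--     for cand in candidates:
--         if cand in raw_set:
--             return cand
--     return cleaned
-- ===== Notes on version B (the rewrite author's own statement) =====
-- stated objective: faster
-- what changed: Instead of sorting all raw features by length and scanning the sorted list against the cleaned name, B enumerates the cleaned name's own underscore-boundary prefixes longest-first and returns the first one found in a set built from the raw features.
import Mathlib
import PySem

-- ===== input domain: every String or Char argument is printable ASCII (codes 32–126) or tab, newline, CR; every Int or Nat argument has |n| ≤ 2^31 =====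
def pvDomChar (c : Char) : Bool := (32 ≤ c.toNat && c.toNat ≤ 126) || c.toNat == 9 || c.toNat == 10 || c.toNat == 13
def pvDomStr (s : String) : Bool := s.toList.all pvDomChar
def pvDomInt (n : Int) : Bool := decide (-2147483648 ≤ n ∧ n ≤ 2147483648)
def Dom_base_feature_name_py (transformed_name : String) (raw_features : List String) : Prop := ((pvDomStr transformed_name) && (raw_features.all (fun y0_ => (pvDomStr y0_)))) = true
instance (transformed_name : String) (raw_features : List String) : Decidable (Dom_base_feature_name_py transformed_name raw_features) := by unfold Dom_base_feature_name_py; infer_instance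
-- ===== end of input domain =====

-- B replaces A's sort-all-raw-features-by-length scan by walking the cleaned name's
-- underscore boundaries (longest candidate first) with a set lookup; return values agree everywhere.

-- ===== PORT A =====
-- cleaned = transformed_name; if "__" in cleaned: cleaned = cleaned.split("__", 1)[1]
-- (the list index [1] cannot fail when "__" occurs; ported with .getD, the default is never used)
def pvCleanA (s : List Char) : List Char :=
  if PySem.Chars.isIn ['_', '_'] s then
    (PySem.List.pyGet? (PySem.Chars.splitOnMax s ['_', '_'] 1) 1).getD s
  else s

-- the loop condition: cleaned == raw or cleaned.startswith(f"{raw}_")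
def pvPredA (cleaned raw : List Char) : Bool :=
  cleaned == raw || PySem.Chars.startswith cleaned (raw ++ ['_'])

-- for raw in sorted(raw_features, key=len, reverse=True): …
def pvLoopA (cleaned : List Char) : List (List Char) → List Char
  | [] => cleaned
  | raw :: rest => if pvPredA cleaned raw then raw else pvLoopA cleaned rest

def base_feature_name_py (transformed_name : String) (raw_features : List String) : String :=
  let cleaned := pvCleanA transformed_name.toList
  String.ofList
    (pvLoopA cleaned
      (PySem.List.sorted (raw_features.map String.toList) (fun r => r.length) true))

-- ===== PORT B =====
def pvCleanB (s : List Char) : List Char :=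
  if PySem.Chars.isIn ['_', '_'] s then
    (PySem.List.pyGet? (PySem.Chars.splitOnMax s ['_', '_'] 1) 1).getD s
  else s

-- candidates = [cleaned] + [cleaned[:i] for i in reversed(range(len(cleaned))) if cleaned[i] == "_"]
def pvCandidates (c : List Char) : List (List Char) :=
  c :: ((List.range c.length).reverse.filterMap fun i =>
          if c.getD i ' ' == '_' then some (c.take i) else none)

-- for cand in candidates: if cand in raw_set: return cand;  return cleaned
def pvLoopB (cleaned : List Char) (rset : PySem.Set (List Char)) : List (List Char) → List Char
  | [] => cleaned
  | cand :: rest => if rset.contains cand then cand else pvLoopB cleaned rset rest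

def base_feature_name_py_alt (transformed_name : String) (raw_features : List String) : String :=
  let cleaned := pvCleanB transformed_name.toList
  let rset := PySem.Set.ofList (raw_features.map String.toList)
  String.ofList (pvLoopB cleaned rset (pvCandidates cleaned))

-- ===== PRECONDITION & SPEC =====
def Spec_base_feature_name_py (transformed_name : String) (raw_features : List String) (out : String) : Prop := out = base_feature_name_py_alt transformed_name raw_features
instance (transformed_name : String) (raw_features : List String) (out : String) : Decidable (Spec_base_feature_name_py transformed_name raw_features out) := by unfold Spec_base_feature_name_py; infer_instance

-- ===== CLAIM (what is proved, stated in full; the proofs are below) =====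
def Claim_equal_base_feature_name_py : Prop := ∀ (transformed_name : String) (raw_features : List String), Dom_base_feature_name_py transformed_name raw_features → Spec_base_feature_name_py transformed_name raw_features (base_feature_name_py transformed_name raw_features)

-- ===== LEMMAS AND PROOFS =====

theorem pred_iff (c r : List Char) : pvPredA c r = true ↔ c = r ∨ (r ++ ['_']) <+: c := by
  simp [pvPredA, PySem.Chars.startswith_iff]

theorem fm_some (c : List Char) (i : Nat) (x : List Char)
    (hx : (if c.getD i ' ' == '_' then some (c.take i) else none) = some x) :
    i < c.length ∧ x = c.take i ∧ x.length = i ∧ getElem? c i = some '_' := by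
  split at hx
  · next hcond =>
    cases hx
    have hi : i < c.length := by
      by_contra hge
      rw [List.getD_eq_default _ _ (Nat.le_of_not_lt hge)] at hcond
      simp at hcond
    have hsome : getElem? c i = some '_' := by
      cases hmem : getElem? c i with
      | none => rw [List.getElem?_eq_none_iff] at hmem; omega
      | some ch =>
        have : ch = '_' := by simpa [List.getD_eq_getElem?_getD, hmem] using hcond
        rw [this]
    exact ⟨hi, rfl, by simp [Nat.min_eq_left (Nat.le_of_lt hi)], hsome⟩
  · cases hx

theorem mem_candidates_iff (c x : List Char) : x ∈ pvCandidates c ↔ pvPredA c x = true := by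
  simp only [pvCandidates, List.mem_cons, List.mem_filterMap, List.mem_reverse, List.mem_range,
    pred_iff]
  constructor
  · rintro (rfl | ⟨i, hi, hx⟩)
    · left; rfl
    · right
      obtain ⟨hi', rfl, hlen, hsome⟩ := fm_some c i x hx
      have : c.take i ++ ['_'] = c.take (i+1) := by
        rw [List.take_add_one, hsome]; rfl
      rw [this]
      exact List.take_prefix _ _
  · rintro (rfl | h)
    · left; rfl
    · right
      obtain ⟨rest, hrest⟩ := h
      rw [List.append_assoc] at hrest
      subst hrest
      refine ⟨x.length, by simp, ?_⟩
      have hgd : (x ++ '_' :: rest).getD x.length ' ' = '_' := by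
        simp [List.getD_eq_getElem?_getD]
      have htk : (x ++ '_' :: rest).take x.length = x := List.take_left
      simp [htk]

theorem candidates_pairwise (c : List Char) :
    (pvCandidates c).Pairwise (fun a b => b.length < a.length) := by
  constructor
  · intro x hx
    simp only [List.mem_filterMap, List.mem_reverse, List.mem_range] at hx
    obtain ⟨i, hi, hxi⟩ := hx
    obtain ⟨hi', -, hlen, -⟩ := fm_some c i x hxi
    omega
  · have hpr : ((List.range c.length).reverse).Pairwise (fun a b : Nat => b < a) := by
      rw [List.pairwise_reverse]; exact List.pairwise_lt_range
    refine List.Pairwise.filterMap _ ?_ hpr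
    intro a a' hab x hx y hy
    obtain ⟨-, -, hlx, -⟩ := fm_some c a x hx
    obtain ⟨-, -, hly, -⟩ := fm_some c a' y hy
    omega

theorem pred_take (c r : List Char) (h : pvPredA c r = true) : r = c.take r.length := by
  rcases (pred_iff c r).1 h with h | h
  · subst h; simp
  · have : r <+: c := (List.prefix_append r ['_']).trans h
    exact List.prefix_iff_eq_take.1 this

theorem loopA_eq (c m : List Char) (l : List (List Char))
    (hp : l.Pairwise (fun a b => b.length ≤ a.length))
    (hm : m ∈ l) (hpm : pvPredA c m = true)
    (hmax : ∀ r ∈ l, pvPredA c r = true → r.length ≤ m.length) :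
    pvLoopA c l = m := by
  induction l with
  | nil => cases hm
  | cons x t ih =>
    rw [List.pairwise_cons] at hp
    by_cases hx : pvPredA c x = true
    · have hxm : x = m := by
        have h1 : x.length ≤ m.length := hmax x (List.mem_cons_self) hx
        rcases List.mem_cons.1 hm with rfl | hmt
        · rfl
        · have h2 : m.length ≤ x.length := hp.1 m hmt
          rw [pred_take c x hx, pred_take c m hpm, le_antisymm h1 h2]
      subst hxm
      simp [pvLoopA, hpm]
    · have hmt : m ∈ t := by
        rcases List.mem_cons.1 hm with rfl | h
        · exact absurd hpm hx
        · exact h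
      simp only [pvLoopA, hx, Bool.false_eq_true, if_false]
      exact ih hp.2 hmt (fun r hr hpr => hmax r (List.mem_cons_of_mem _ hr) hpr)

theorem loopA_none (c : List Char) (l : List (List Char))
    (h : ∀ r ∈ l, pvPredA c r = false) : pvLoopA c l = c := by
  induction l with
  | nil => rfl
  | cons x t ih =>
    have := h x (List.mem_cons_self)
    simp only [pvLoopA, this]
    exact ih (fun r hr => h r (List.mem_cons_of_mem _ hr))

theorem loopB_eq (c m : List Char) (rset : PySem.Set (List Char)) (l : List (List Char))
    (hp : l.Pairwise (fun a b => b.length < a.length))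
    (hm : m ∈ l) (hmem : m ∈ rset)
    (hmax : ∀ x ∈ l, x ∈ rset → x.length ≤ m.length) :
    pvLoopB c rset l = m := by
  induction l with
  | nil => cases hm
  | cons x t ih =>
    rw [List.pairwise_cons] at hp
    by_cases hx : x ∈ rset
    · have hxm : x = m := by
        rcases List.mem_cons.1 hm with rfl | hmt
        · rfl
        · have h1 : x.length ≤ m.length := hmax x (List.mem_cons_self) hx
          have h2 : m.length < x.length := hp.1 m hmt
          omega
      subst hxm
      simp [pvLoopB, hx]
    · have hmt : m ∈ t := by
        rcases List.mem_cons.1 hm with rfl | h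
        · exact absurd hmem hx
        · exact h
      simp only [pvLoopB]
      rw [if_neg (by simpa [PySem.Set.contains_iff] using hx)]
      exact ih hp.2 hmt (fun r hr => hmax r (List.mem_cons_of_mem _ hr))

theorem loopB_none (c : List Char) (rset : PySem.Set (List Char)) (l : List (List Char))
    (h : ∀ x ∈ l, x ∉ rset) : pvLoopB c rset l = c := by
  induction l with
  | nil => rfl
  | cons x t ih =>
    simp only [pvLoopB]
    rw [if_neg (by simpa [PySem.Set.contains_iff] using h x List.mem_cons_self)]
    exact ih (fun r hr => h r (List.mem_cons_of_mem _ hr))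

theorem exists_max_match (c : List Char) (rs : List (List Char))
    (h : ∃ r ∈ rs, pvPredA c r = true) :
    ∃ m ∈ rs, pvPredA c m = true ∧ ∀ r ∈ rs, pvPredA c r = true → r.length ≤ m.length := by
  induction rs with
  | nil => obtain ⟨r, hr, -⟩ := h; cases hr
  | cons x t ih =>
    by_cases hex : ∃ r ∈ t, pvPredA c r = true
    · obtain ⟨m, hm, hpm, hmax⟩ := ih hex
      by_cases hx : pvPredA c x = true
      · by_cases hle : x.length ≤ m.length
        · exact ⟨m, List.mem_cons_of_mem _ hm, hpm, by
            intro r hr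
            rcases List.mem_cons.1 hr with rfl | hr'
            · intro _; exact hle
            · exact hmax r hr'⟩
        · exact ⟨x, List.mem_cons_self, hx, by
            intro r hr
            rcases List.mem_cons.1 hr with rfl | hr'
            · intro _; exact le_refl _
            · intro hpr; have := hmax r hr' hpr; omega⟩
      · exact ⟨m, List.mem_cons_of_mem _ hm, hpm, by
          intro r hr
          rcases List.mem_cons.1 hr with rfl | hr'
          · intro hpr; exact absurd hpr hx
          · exact hmax r hr'⟩
    · obtain ⟨r, hr, hpr⟩ := h
      have hrx : r = x := by
        rcases List.mem_cons.1 hr with rfl | hrt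
        · rfl
        · exact absurd ⟨r, hrt, hpr⟩ hex
      subst hrx
      exact ⟨r, List.mem_cons_self, hpr, by
        intro s hs
        rcases List.mem_cons.1 hs with rfl | hs'
        · intro _; exact le_refl _
        · intro hps; exact absurd ⟨s, hs', hps⟩ hex⟩

theorem main_eq (c : List Char) (rs : List (List Char)) :
    pvLoopA c (PySem.List.sorted rs (fun r => r.length) true)
      = pvLoopB c (PySem.Set.ofList rs) (pvCandidates c) := by
  by_cases hex : ∃ r ∈ rs, pvPredA c r = true
  · obtain ⟨m, hm, hpm, hmax⟩ := exists_max_match c rs hex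
    rw [loopA_eq c m _ (PySem.List.sorted_pairwise_rev rs _)
        ((PySem.List.mem_sorted rs _ true m).2 hm) hpm
        (fun r hr hpr => hmax r ((PySem.List.mem_sorted rs _ true r).1 hr) hpr),
      loopB_eq c m _ _ (candidates_pairwise c) ((mem_candidates_iff c m).2 hpm)
        ((PySem.Set.mem_ofList rs m).2 hm)
        (fun x hx hxr => hmax x ((PySem.Set.mem_ofList rs x).1 hxr) ((mem_candidates_iff c x).1 hx))]
  · push Not at hex
    rw [loopA_none c _ (fun r hr => by
        have := hex r ((PySem.List.mem_sorted rs _ true r).1 hr); simpa using this),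
      loopB_none c _ _ (fun x hx hxr =>
        hex x ((PySem.Set.mem_ofList rs x).1 hxr) ((mem_candidates_iff c x).1 hx))]

-- ===== VERDICT (by name: the statement is the Claim_ definition above) =====
theorem base_feature_name_py_spec : Claim_equal_base_feature_name_py := by
  intro t rf _
  show _ = _
  unfold base_feature_name_py base_feature_name_py_alt
  have hc : pvCleanA t.toList = pvCleanB t.toList := rfl
  simp only []
  rw [hc]
  exact congrArg String.ofList (main_eq _ _)
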